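-- pv_equiv track=rewrite | github.com/eliottcassidy2000/math | 04-computation/H21_gap_search.py | build_conflict_graph
-- ===== SOURCE A (Python) =====
-- def build_conflict_graph(cycle_sets):
--     """Build conflict graph: vertices are cycle sets, edges between non-disjoint ones."""
--     cycles = list(cycle_sets)
--     m = len(cycles)
--     adj = [[False]*m for _ in range(m)]
--     for i in range(m):
--         for j in range(i+1, m):
--             if cycles[i] & cycles[j]:  # share a vertex
--                 adj[i][j] = True
--                 adj[j][i] = True
--     return cycles, adj
-- ===== SOURCE B (Python) =====
-- def build_conflict_graph(cycle_sets):
--     """Build conflict graph via an inverted index vertex -> sets containing it."""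
--     cycles = list(cycle_sets)
--     m = len(cycles)
--     owner = {}
--     for i, s in enumerate(cycles):
--         for v in s:
--             owner.setdefault(v, []).append(i)
--     adj = [[False] * m for _ in range(m)]
--     for idxs in owner.values():
--         k = len(idxs)
--         for a in range(k):
--             i = idxs[a]
--             for b in range(a + 1, k):
--                 j = idxs[b]
--                 adj[i][j] = True
--                 adj[j][i] = True
--     return cycles, adj
-- ===== Notes on version B (the rewrite author's own statement) =====
-- stated objective: faster
-- what changed: Replaced the all-pairs set-intersection scan with an inverted index mapping each vertex to the sets containing it, marking adjacency only for pairs that actually co-occur at some vertex.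
import Mathlib
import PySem

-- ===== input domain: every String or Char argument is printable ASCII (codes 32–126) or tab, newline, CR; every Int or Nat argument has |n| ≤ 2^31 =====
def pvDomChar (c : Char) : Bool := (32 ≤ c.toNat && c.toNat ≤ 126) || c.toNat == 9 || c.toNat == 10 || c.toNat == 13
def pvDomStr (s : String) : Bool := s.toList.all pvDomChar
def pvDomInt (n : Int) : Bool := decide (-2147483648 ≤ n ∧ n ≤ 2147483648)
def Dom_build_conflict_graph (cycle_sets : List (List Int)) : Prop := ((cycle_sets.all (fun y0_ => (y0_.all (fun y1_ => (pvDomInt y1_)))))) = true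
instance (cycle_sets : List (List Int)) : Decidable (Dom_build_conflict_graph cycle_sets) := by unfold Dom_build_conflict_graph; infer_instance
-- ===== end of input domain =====

-- B replaces A's all-pairs set-intersection scan by an inverted index (vertex -> indices of sets
-- containing it) and marks adjacency per co-occurring pair; measured faster on sparse inputs.


-- shared helper: Python's 'adj[i][j] = True' (i, j in range at every use site)
def pvSet2 (adj : List (List Bool)) (i j : Nat) : List (List Bool) :=
  adj.modify i (fun row => row.set j true)

-- ===== PORT A =====
def build_conflict_graph (cycle_sets : List (List Int)) : List (List Int) × List (List Bool) :=
  let cycles := cycle_sets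
  let m := cycles.length
  let adj0 := List.replicate m (List.replicate m false)
  let adj := (List.range m).foldl (fun adj i =>
    (List.range' (i+1) (m - (i+1))).foldl (fun adj j =>
      if PySem.Set.inter (cycles.getD i []) (cycles.getD j []) ≠ [] then
        pvSet2 (pvSet2 adj i j) j i
      else adj) adj) adj0
  (cycles, adj)

-- ===== PORT B =====
def build_conflict_graph_alt (cycle_sets : List (List Int)) : List (List Int) × List (List Bool) :=
  let cycles := cycle_sets
  let m := cycles.length
  let owner : PySem.Dict Int (List Int) :=
    (PySem.List.enumerate cycles 0).foldl (fun d p =>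
      p.2.foldl (fun d v => d.insert v (d.getD v [] ++ [p.1])) d) PySem.Dict.empty
  let adj0 := List.replicate m (List.replicate m false)
  let adj := owner.values.foldl (fun adj idxs =>
    (List.range idxs.length).foldl (fun adj a =>
      (List.range' (a+1) (idxs.length - (a+1))).foldl (fun adj b =>
        pvSet2 (pvSet2 adj (idxs.getD a 0).toNat (idxs.getD b 0).toNat)
               (idxs.getD b 0).toNat (idxs.getD a 0).toNat) adj) adj) adj0
  (cycles, adj)

-- ===== PRECONDITION & SPEC =====
-- The parameter is a list of Python SETS (list[set[int]]), so each inner list holds distinct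
-- elements; inner lists with repeated elements encode no Python input and lie outside Pre_.
def Pre_build_conflict_graph (cycle_sets : List (List Int)) : Prop :=
  ∀ s ∈ cycle_sets, s.Nodup
instance (cycle_sets : List (List Int)) : Decidable (Pre_build_conflict_graph cycle_sets) := by
  unfold Pre_build_conflict_graph; infer_instance
def pvWitness_build_conflict_graph : List (List Int) := [[1, 2], [2, 3], [4]]

def Spec_build_conflict_graph (cycle_sets : List (List Int)) (out : List (List Int) × List (List Bool)) : Prop := out = build_conflict_graph_alt cycle_sets
instance (cycle_sets : List (List Int)) (out : List (List Int) × List (List Bool)) : Decidable (Spec_build_conflict_graph cycle_sets out) := by unfold Spec_build_conflict_graph; infer_instance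

-- ===== CLAIM (what is proved, stated in full; the proofs are below) =====
def Claim_equal_build_conflict_graph : Prop := ∀ (cycle_sets : List (List Int)), Dom_build_conflict_graph cycle_sets → Pre_build_conflict_graph cycle_sets → Spec_build_conflict_graph cycle_sets (build_conflict_graph cycle_sets)

-- ===== LEMMAS AND PROOFS =====
def pvEntry (adj : List (List Bool)) (p q : Nat) : Bool := (adj.getD p []).getD q false
def pvShaped (m : Nat) (adj : List (List Bool)) : Prop :=
  adj.length = m ∧ ∀ (p : Nat) (h : p < adj.length), adj[p].length = m

theorem pvShaped_set2 {m : Nat} {adj : List (List Bool)} (h : pvShaped m adj) (i j : Nat) :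
    pvShaped m (pvSet2 adj i j) := by
  obtain ⟨h1, h2⟩ := h
  refine ⟨by simp [pvSet2, h1], ?_⟩
  intro p hp
  simp only [pvSet2] at hp ⊢
  rw [List.getElem_modify]
  split
  · simp [h2]
  · exact h2 _ _

theorem pvEntry_set2 {m : Nat} {adj : List (List Bool)} (h : pvShaped m adj)
    {i j : Nat} (hi : i < m) (hj : j < m) (p q : Nat) :
    pvEntry (pvSet2 adj i j) p q = (pvEntry adj p q || (decide (p = i) && decide (q = j))) := by
  obtain ⟨h1, h2⟩ := h
  simp only [pvEntry, pvSet2, List.getD_eq_getElem?_getD, List.getElem?_modify]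
  by_cases hip : i = p
  · subst hip
    have hlt : i < adj.length := h1 ▸ hi
    rw [List.getElem?_eq_getElem hlt]
    simp only [Option.getD_some]
    by_cases hjq : j = q
    · subst hjq
      simp [h2 i hlt, hj]
    · simp [hjq, Ne.symm hjq]
  · have hpi : ¬ p = i := fun h => hip h.symm
    simp [hip, hpi]

def pvApply (adj : List (List Bool)) (u : List (Nat × Nat)) : List (List Bool) :=
  u.foldl (fun a pr => pvSet2 a pr.1 pr.2) adj

theorem pvShaped_apply {m : Nat} {adj : List (List Bool)} (h : pvShaped m adj) (u : List (Nat × Nat)) :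
    pvShaped m (pvApply adj u) := by
  induction u generalizing adj with
  | nil => exact h
  | cons pr u ih => exact ih (pvShaped_set2 h pr.1 pr.2)

theorem pvEntry_apply {m : Nat} {adj : List (List Bool)} (h : pvShaped m adj)
    {u : List (Nat × Nat)} (hu : ∀ pr ∈ u, pr.1 < m ∧ pr.2 < m) (p q : Nat) :
    pvEntry (pvApply adj u) p q = (pvEntry adj p q || decide ((p, q) ∈ u)) := by
  induction u generalizing adj with
  | nil => simp [pvApply]
  | cons pr u ih =>
    have hpr := hu pr (by simp)
    rw [show pvApply adj (pr :: u) = pvApply (pvSet2 adj pr.1 pr.2) u from rfl,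
      ih (pvShaped_set2 h pr.1 pr.2) (fun x hx => hu x (by simp [hx])),
      pvEntry_set2 h hpr.1 hpr.2]
    apply Bool.eq_iff_iff.mpr
    simp only [Bool.or_eq_true, Bool.and_eq_true, decide_eq_true_eq, List.mem_cons, Prod.ext_iff]
    tauto

theorem pv_foldl_apply {β : Type} (l : List β) (g : β → List (Nat × Nat)) (adj : List (List Bool)) :
    l.foldl (fun adj x => pvApply adj (g x)) adj = pvApply adj (l.flatMap g) := by
  induction l generalizing adj with
  | nil => rfl
  | cons x l ih =>
    rw [List.foldl_cons, List.flatMap_cons]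
    show List.foldl _ (pvApply adj (g x)) l = pvApply adj _
    rw [ih]; show _ = List.foldl _ adj _; rw [List.foldl_append]; rfl

theorem pv_pairfold {β : Type} (l : List β) (p : β → Prop) [DecidablePred p] (f g : β → Nat) (adj : List (List Bool)) :
    l.foldl (fun adj x => if p x then pvSet2 (pvSet2 adj (f x) (g x)) (g x) (f x) else adj) adj
      = pvApply adj (l.flatMap (fun x => if p x then [(f x, g x), (g x, f x)] else [])) := by
  induction l generalizing adj with
  | nil => rfl
  | cons x l ih =>
    rw [List.foldl_cons, List.flatMap_cons, pvApply, List.foldl_append, ih]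
    by_cases hp : p x <;> simp [hp, pvApply]

def pvShare (cycles : List (List Int)) (p q : Nat) : Prop :=
  ∃ v, v ∈ cycles.getD p [] ∧ v ∈ cycles.getD q []

def pvUA (cycles : List (List Int)) : List (Nat × Nat) :=
  (List.range cycles.length).flatMap (fun i =>
    (List.range' (i+1) (cycles.length - (i+1))).flatMap (fun j =>
      if PySem.Set.inter (cycles.getD i []) (cycles.getD j []) ≠ [] then [(i, j), (j, i)] else []))


theorem pvA_eq (cycle_sets : List (List Int)) :
    build_conflict_graph cycle_sets =
      (cycle_sets, pvApply (List.replicate cycle_sets.length (List.replicate cycle_sets.length false)) (pvUA cycle_sets)) := by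
  unfold build_conflict_graph pvUA
  refine Prod.ext rfl ?_
  show List.foldl _ _ _ = _
  rw [← pv_foldl_apply]
  congr 1
  funext adj i
  exact pv_pairfold _ _ (fun _ => i) (fun j => j) adj

def pvOwnerF (cycles : List (List Int)) : PySem.Dict Int (List Int) :=
  (PySem.List.enumerate cycles 0).foldl (fun d p =>
    p.2.foldl (fun d v => d.insert v (d.getD v [] ++ [p.1])) d) PySem.Dict.empty

def pvUB (cycles : List (List Int)) : List (Nat × Nat) :=
  (pvOwnerF cycles).values.flatMap (fun idxs =>
    (List.range idxs.length).flatMap (fun a =>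
      (List.range' (a+1) (idxs.length - (a+1))).flatMap (fun b =>
        [((idxs.getD a 0).toNat, (idxs.getD b 0).toNat),
         ((idxs.getD b 0).toNat, (idxs.getD a 0).toNat)])))


theorem pvB_eq (cycle_sets : List (List Int)) :
    build_conflict_graph_alt cycle_sets =
      (cycle_sets, pvApply (List.replicate cycle_sets.length (List.replicate cycle_sets.length false)) (pvUB cycle_sets)) := by
  unfold build_conflict_graph_alt pvUB
  refine Prod.ext rfl ?_
  show List.foldl _ _ ((pvOwnerF cycle_sets).values) = _
  rw [← pv_foldl_apply]
  congr 1
  funext adj idxs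
  rw [← pv_foldl_apply]
  congr 1
  funext adj a
  have := pv_pairfold (List.range' (a+1) (idxs.length - (a+1))) (fun _ => True)
    (fun _ => (idxs.getD a 0).toNat) (fun b => (idxs.getD b 0).toNat) adj
  simp only [if_true] at this
  exact this

theorem pv_inter_ne_nil (a b : List Int) :
    PySem.Set.inter a b ≠ [] ↔ ∃ v, v ∈ a ∧ v ∈ b := by
  rw [Ne, List.eq_nil_iff_forall_not_mem]
  push_neg
  simp only [PySem.Set.mem_inter]

theorem pvShare_symm {cycles : List (List Int)} {p q : Nat} (h : pvShare cycles p q) :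
    pvShare cycles q p := by
  obtain ⟨v, h1, h2⟩ := h; exact ⟨v, h2, h1⟩

theorem pv_mem_UA (cycles : List (List Int)) (p q : Nat) :
    (p, q) ∈ pvUA cycles ↔ p < cycles.length ∧ q < cycles.length ∧ p ≠ q ∧ pvShare cycles p q := by
  simp only [pvUA, List.mem_flatMap, List.mem_range, List.mem_range'_1]
  constructor
  · rintro ⟨i, hi, j, ⟨hj1, hj2⟩, hmem⟩
    split at hmem
    case isTrue hc =>
      have hshare : pvShare cycles i j := (pv_inter_ne_nil _ _).mp hc
      simp only [List.mem_cons, List.not_mem_nil, or_false, Prod.mk.injEq] at hmem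
      rcases hmem with ⟨rfl, rfl⟩ | ⟨rfl, rfl⟩
      · exact ⟨hi, by omega, by omega, hshare⟩
      · exact ⟨by omega, hi, by omega, pvShare_symm hshare⟩
    case isFalse => simp at hmem
  · rintro ⟨hp, hq, hne, hshare⟩
    rcases Nat.lt_or_gt_of_ne hne with hlt | hlt
    · refine ⟨p, hp, q, ⟨by omega, by omega⟩, ?_⟩
      rw [if_pos ((pv_inter_ne_nil _ _).mpr hshare)]
      simp
    · refine ⟨q, hq, p, ⟨by omega, by omega⟩, ?_⟩
      rw [if_pos ((pv_inter_ne_nil _ _).mpr (pvShare_symm hshare))]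
      simp

theorem pv_inner_getD_of_not_mem {ys : List Int} {d : PySem.Dict Int (List Int)} {i v : Int}
    (hv : v ∉ ys) :
    (ys.foldl (fun d v' => d.insert v' (d.getD v' [] ++ [i])) d).getD v [] = d.getD v [] := by
  induction ys generalizing d with
  | nil => rfl
  | cons y ys ih =>
    rw [List.foldl_cons, ih (fun h => hv (List.mem_cons_of_mem _ h)),
      PySem.Dict.getD_insert_of_ne _ _ _ (fun h : v = y => hv (h ▸ List.mem_cons_self))]

theorem pv_inner_getD {ys : List Int} (hnd : ys.Nodup) (d : PySem.Dict Int (List Int)) (i v : Int) :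
    (ys.foldl (fun d v' => d.insert v' (d.getD v' [] ++ [i])) d).getD v []
      = d.getD v [] ++ (if v ∈ ys then [i] else []) := by
  induction ys generalizing d with
  | nil => simp
  | cons y ys ih =>
    rw [List.foldl_cons]
    by_cases hvy : v = y
    · subst hvy
      rw [pv_inner_getD_of_not_mem hnd.notMem, PySem.Dict.getD_insert_self]
      simp
    · rw [ih hnd.of_cons, PySem.Dict.getD_insert_of_ne _ _ _ hvy]
      simp [hvy]

theorem pv_inner_contains (ys : List Int) (d : PySem.Dict Int (List Int)) (i v : Int) :
    (ys.foldl (fun d v' => d.insert v' (d.getD v' [] ++ [i])) d).contains v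
      = (d.contains v || decide (v ∈ ys)) := by
  induction ys generalizing d with
  | nil => simp
  | cons y ys ih =>
    rw [List.foldl_cons, ih, PySem.Dict.contains_insert]
    by_cases h : v = y <;> simp [h, Bool.or_assoc]

theorem pv_outer_getD (xs : List (List Int)) (hset : ∀ x ∈ xs, x.Nodup) (s : Int)
    (d : PySem.Dict Int (List Int)) (v : Int) :
    ((PySem.List.enumerate xs s).foldl (fun d p =>
        p.2.foldl (fun d v' => d.insert v' (d.getD v' [] ++ [p.1])) d) d).getD v []
      = d.getD v [] ++ ((PySem.List.enumerate xs s).filter (fun pr => decide (v ∈ pr.2))).map (·.1) := by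
  induction xs generalizing s d with
  | nil => simp [PySem.List.enumerate_nil]
  | cons x xs ih =>
    rw [PySem.List.enumerate_cons, List.foldl_cons, List.filter_cons,
      ih (fun y hy => hset y (List.mem_cons_of_mem _ hy)) (s+1),
      pv_inner_getD (hset x List.mem_cons_self)]
    by_cases hv : v ∈ x <;> simp [hv]

theorem pv_outer_contains (xs : List (List Int)) (s : Int) (d : PySem.Dict Int (List Int)) (v : Int) :
    ((PySem.List.enumerate xs s).foldl (fun d p =>
        p.2.foldl (fun d v' => d.insert v' (d.getD v' [] ++ [p.1])) d) d).contains v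
      = (d.contains v || xs.any (fun x => decide (v ∈ x))) := by
  induction xs generalizing s d with
  | nil => simp [PySem.List.enumerate_nil]
  | cons x xs ih =>
    rw [PySem.List.enumerate_cons, List.foldl_cons, ih (s+1), pv_inner_contains]
    simp [Bool.or_assoc]

theorem pv_outer_nodup (l : List (Int × List Int)) (d : PySem.Dict Int (List Int))
    (h : d.keys.Nodup) :
    (l.foldl (fun d p => p.2.foldl (fun d v' => d.insert v' (d.getD v' [] ++ [p.1])) d) d).keys.Nodup := by
  induction l generalizing d with
  | nil => exact h
  | cons p l ih =>
    exact ih _ (PySem.Dict.nodup_keys_foldl_insert p.2 (fun d v' => d.getD v' [] ++ [p.1]) d h)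

theorem pv_owner_nodup_keys (cycles : List (List Int)) : (pvOwnerF cycles).keys.Nodup :=
  pv_outer_nodup _ _ PySem.Dict.nodup_keys_empty

theorem pv_owner_getD (cycles : List (List Int)) (hset : ∀ x ∈ cycles, x.Nodup) (v : Int) :
    (pvOwnerF cycles).getD v []
      = ((PySem.List.enumerate cycles 0).filter (fun pr => decide (v ∈ pr.2))).map (·.1) := by
  unfold pvOwnerF
  rw [pv_outer_getD cycles hset 0 PySem.Dict.empty v, PySem.Dict.getD_empty]
  rfl

theorem pv_owner_contains (cycles : List (List Int)) (v : Int) :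
    (pvOwnerF cycles).contains v = cycles.any (fun x => decide (v ∈ x)) := by
  unfold pvOwnerF
  rw [pv_outer_contains, PySem.Dict.contains_empty]
  rfl

theorem pv_mem_E (cycles : List (List Int)) (v x : Int) :
    x ∈ ((PySem.List.enumerate cycles 0).filter (fun pr => decide (v ∈ pr.2))).map (·.1)
      ↔ ∃ k, ∃ _h : k < cycles.length, x = (k : Int) ∧ v ∈ cycles[k] := by
  simp only [List.mem_map, List.mem_filter, PySem.List.mem_enumerate_iff]
  constructor
  · rintro ⟨pr, ⟨⟨k, hk, rfl⟩, hv⟩, rfl⟩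
    simp only [decide_eq_true_eq] at hv
    exact ⟨k, hk, by simp, hv⟩
  · rintro ⟨k, hk, rfl, hv⟩
    exact ⟨((k : Int), cycles[k]), ⟨⟨k, hk, by simp⟩, by simp [hv]⟩, rfl⟩

theorem pv_E_pairwise (cycles : List (List Int)) (v : Int) :
    (((PySem.List.enumerate cycles 0).filter (fun pr => decide (v ∈ pr.2))).map (·.1)).Pairwise (· < ·) := by
  rw [List.pairwise_map]
  exact (PySem.List.pairwise_lt_enumerate cycles 0).filter _

theorem pv_mem_UB (cycles : List (List Int)) (hset : ∀ s ∈ cycles, s.Nodup) (p q : Nat) :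
    (p, q) ∈ pvUB cycles ↔ p < cycles.length ∧ q < cycles.length ∧ p ≠ q ∧ pvShare cycles p q := by
  have hvals : (pvOwnerF cycles).values
      = (pvOwnerF cycles).keys.map (fun k => (pvOwnerF cycles).getD k []) :=
    PySem.Dict.values_eq_map_keys _ (pv_owner_nodup_keys cycles) []
  simp only [pvUB, List.mem_flatMap, List.mem_range, List.mem_range'_1]
  constructor
  · rintro ⟨idxs, hidxs, a, ha, b, ⟨hb1, hb2⟩, hmem⟩
    rw [hvals] at hidxs
    obtain ⟨v, hvk, rfl⟩ := List.mem_map.mp hidxs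
    rw [pv_owner_getD cycles hset v] at *
    have hb : b < (((PySem.List.enumerate cycles 0).filter (fun pr => decide (v ∈ pr.2))).map (·.1)).length := by omega
    set E := ((PySem.List.enumerate cycles 0).filter (fun pr => decide (v ∈ pr.2))).map (·.1) with hE
    have hab : a < b := by omega
    have hlt : E[a] < E[b] := List.pairwise_iff_getElem.mp (pv_E_pairwise cycles v) a b ha hb hab
    obtain ⟨kx, hkx, hx, hvx⟩ := (pv_mem_E cycles v E[a]).mp (List.getElem_mem ha)
    obtain ⟨ky, hky, hy, hvy⟩ := (pv_mem_E cycles v E[b]).mp (List.getElem_mem hb)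
    rw [List.getD_eq_getElem E 0 ha, List.getD_eq_getElem E 0 hb] at hmem
    have hkk : kx ≠ ky := by rw [hx, hy] at hlt; exact_mod_cast Nat.ne_of_lt (by exact_mod_cast hlt)
    have hshare : pvShare cycles kx ky :=
      ⟨v, by rw [List.getD_eq_getElem _ _ hkx]; exact hvx, by rw [List.getD_eq_getElem _ _ hky]; exact hvy⟩
    simp only [List.mem_cons, List.not_mem_nil, or_false, Prod.mk.injEq] at hmem
    rcases hmem with ⟨rfl, rfl⟩ | ⟨rfl, rfl⟩
    · rw [hx, hy]; simpa using ⟨hkx, hky, hkk, hshare⟩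
    · rw [hx, hy]; simpa using ⟨hky, hkx, fun h => hkk h.symm, pvShare_symm hshare⟩
  · rintro ⟨hp, hq, hne, v, hvp, hvq⟩
    rw [List.getD_eq_getElem _ _ hp] at hvp
    rw [List.getD_eq_getElem _ _ hq] at hvq
    have hvk : v ∈ (pvOwnerF cycles).keys := by
      rw [← PySem.Dict.contains_iff_mem_keys, pv_owner_contains]
      exact List.any_eq_true.mpr ⟨cycles[p], List.getElem_mem hp, by simp [hvp]⟩
    set E := ((PySem.List.enumerate cycles 0).filter (fun pr => decide (v ∈ pr.2))).map (·.1) with hE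
    have hidxs : E ∈ (pvOwnerF cycles).values := by
      rw [hvals]
      exact List.mem_map.mpr ⟨v, hvk, (pv_owner_getD cycles hset v).symm ▸ rfl⟩
    have hpE : ((p : Nat) : Int) ∈ E := (pv_mem_E cycles v _).mpr ⟨p, hp, rfl, hvp⟩
    have hqE : ((q : Nat) : Int) ∈ E := (pv_mem_E cycles v _).mpr ⟨q, hq, rfl, hvq⟩
    have ha : List.idxOf ((p : Nat) : Int) E < E.length := List.idxOf_lt_length_iff.mpr hpE
    have hb : List.idxOf ((q : Nat) : Int) E < E.length := List.idxOf_lt_length_iff.mpr hqE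
    set a := List.idxOf ((p : Nat) : Int) E
    set b := List.idxOf ((q : Nat) : Int) E
    have hEa : E[a] = ((p : Nat) : Int) := List.getElem_idxOf ha
    have hEb : E[b] = ((q : Nat) : Int) := List.getElem_idxOf hb
    have hab : a ≠ b := by
      intro h; apply hne; simp only [h] at hEa; rw [hEa] at hEb; exact_mod_cast hEb
    rcases Nat.lt_or_gt_of_ne hab with hlt | hlt
    · refine ⟨E, hidxs, a, ha, b, ⟨by omega, by omega⟩, ?_⟩
      rw [List.getD_eq_getElem E 0 ha, List.getD_eq_getElem E 0 hb, hEa, hEb]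
      simp
    · refine ⟨E, hidxs, b, hb, a, ⟨by omega, by omega⟩, ?_⟩
      rw [List.getD_eq_getElem E 0 ha, List.getD_eq_getElem E 0 hb, hEa, hEb]
      simp

theorem pv_matrix_ext {m : Nat} {a b : List (List Bool)} (ha : pvShaped m a) (hb : pvShaped m b)
    (h : ∀ p q, pvEntry a p q = pvEntry b p q) : a = b := by
  apply List.ext_getElem (ha.1.trans hb.1.symm)
  intro p h1 h2
  apply List.ext_getElem ((ha.2 p h1).trans (hb.2 p h2).symm)
  intro q hq1 hq2
  have := h p q
  rwa [pvEntry, pvEntry, List.getD_eq_getElem a [] h1, List.getD_eq_getElem b [] h2,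
    List.getD_eq_getElem _ false hq1, List.getD_eq_getElem _ false hq2] at this

theorem pv_shaped_zero (m : Nat) : pvShaped m (List.replicate m (List.replicate m false)) := by
  constructor
  · simp
  · intro p hp; simp at hp ⊢

theorem pv_entry_zero (m : Nat) (p q : Nat) :
    pvEntry (List.replicate m (List.replicate m false)) p q = false := by
  simp only [pvEntry, List.getD_eq_getElem?_getD, List.getElem?_replicate]
  by_cases hp : p < m <;> by_cases hq : q < m <;> simp [hp, hq]

theorem pv_final (cycle_sets : List (List Int)) (hpre : ∀ s ∈ cycle_sets, s.Nodup) :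
    build_conflict_graph cycle_sets = build_conflict_graph_alt cycle_sets := by
  rw [pvA_eq, pvB_eq]
  refine Prod.ext rfl ?_
  show pvApply _ _ = pvApply _ _
  have h0 := pv_shaped_zero cycle_sets.length
  have hUA : ∀ pr ∈ pvUA cycle_sets, pr.1 < cycle_sets.length ∧ pr.2 < cycle_sets.length := by
    rintro ⟨p, q⟩ h
    have := (pv_mem_UA cycle_sets p q).mp h
    exact ⟨this.1, this.2.1⟩
  have hUB : ∀ pr ∈ pvUB cycle_sets, pr.1 < cycle_sets.length ∧ pr.2 < cycle_sets.length := by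
    rintro ⟨p, q⟩ h
    have := (pv_mem_UB cycle_sets hpre p q).mp h
    exact ⟨this.1, this.2.1⟩
  apply pv_matrix_ext (pvShaped_apply h0 _) (pvShaped_apply h0 _)
  intro p q
  rw [pvEntry_apply h0 hUA, pvEntry_apply h0 hUB, pv_entry_zero]
  simp only [Bool.false_or]
  rw [decide_eq_decide, pv_mem_UA, pv_mem_UB cycle_sets hpre]

-- ===== VERDICT (by name: the statement is the Claim_ definition above) =====
theorem build_conflict_graph_spec : Claim_equal_build_conflict_graph := by
  intro cycle_sets _ hpre
  unfold Spec_build_conflict_graph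
  exact pv_final cycle_sets hpre
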